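-- pv_equiv track=rewrite | github.com/Dongmin-Sim/algorithms | Greedy/1759.py | solution
-- ===== SOURCE A (Python) =====
-- from itertools import combinations
--
-- def counting_vowels(c, n, perm):
--     cnt = 0
--     for i in range(n):
--         if perm[i] in ['a', 'e', 'i', 'o', 'u']:
--             cnt += 1
--
--     return cnt
--
-- def solution(l, c, password):
--     '''
--     1. 암호는 L개, 최소 1개의 모음(a, e, i, o, u) + 최소 2개의 자음으로 구성
--     2. 알파벳 오름차순
--     '''
--     password.sort()
--     candidate = []
--     perms = list(combinations(password, l))
--
--     for perm in perms:
--         n = len(perm)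
--
--         # if not ascending_check(n, perm):
--         #     continue
--
--         if 2 <= (l - counting_vowels(c, n, perm)) < l:
--             candidate.append(perm)
--
--     return candidate
-- ===== SOURCE B (Python) =====
-- # B: recursive take/skip backtracking with a running vowel count instead of
-- # itertools.combinations + a per-tuple index-loop recount. Sorts password in place like A.
-- VOWELS = ('a', 'e', 'i', 'o', 'u')
--
-- def solution(l, c, password):
--     password.sort()
--
--     def go(rest, pick, vcnt):
--         if len(pick) == l:
--             return [pick] if 2 <= l - vcnt < l else []
--         if not rest:
--             return []
--         head, tail = rest[0], rest[1:]
--         return (go(tail, pick + (head,), vcnt + (head in VOWELS))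
--                 + go(tail, pick, vcnt))
--
--     return go(tuple(password), (), 0)
-- ===== Notes on version B (the rewrite author's own statement) =====
-- stated objective: alternative
-- what changed: Replaces list(itertools.combinations(...)) plus a per-tuple index-loop vowel recount by a recursive take/skip backtracking generator that carries a running vowel count and tests the candidate at the leaf.
import Mathlib
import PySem

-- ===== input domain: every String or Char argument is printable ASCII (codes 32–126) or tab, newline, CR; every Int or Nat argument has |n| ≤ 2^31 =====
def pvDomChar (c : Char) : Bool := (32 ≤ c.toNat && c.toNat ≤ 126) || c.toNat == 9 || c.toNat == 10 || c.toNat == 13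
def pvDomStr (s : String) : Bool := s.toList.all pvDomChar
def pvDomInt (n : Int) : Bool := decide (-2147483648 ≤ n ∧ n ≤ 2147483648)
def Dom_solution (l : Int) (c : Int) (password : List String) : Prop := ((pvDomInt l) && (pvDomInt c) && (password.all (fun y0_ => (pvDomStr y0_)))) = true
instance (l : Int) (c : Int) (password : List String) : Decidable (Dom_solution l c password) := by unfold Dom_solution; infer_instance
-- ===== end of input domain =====

-- B replaces itertools.combinations + a per-tuple recount by take/skip backtracking with a
-- running vowel count (objective: alternative). Both A and B sort `password` in place; the
-- equivalence proved here is about the return value.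

-- ===== PORT A =====
-- perm[i] is always in range (i < n = len(perm)), so pyGetD with a dummy default is exact here
def counting_vowels (c : Int) (n : Int) (perm : List String) : Int :=
  (PySem.List.pyRange 0 n 1).foldl
    (fun cnt i => if PySem.List.pyGetD perm i "" ∈ ["a", "e", "i", "o", "u"] then cnt + 1 else cnt) 0

-- itertools.combinations(xs, k) in the order itertools emits
def pyCombinations : Nat → List String → List (List String)
  | 0, _ => [[]]
  | _ + 1, [] => []
  | k + 1, x :: xs => (pyCombinations k xs).map (x :: ·) ++ pyCombinations (k + 1) xs

def solution (l : Int) (c : Int) (password : List String) : List (List String) :=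
  let pw := PySem.List.sorted password (fun x => x) false
  let perms := pyCombinations l.toNat pw
  perms.foldl
    (fun candidate perm =>
      let n : Int := perm.length
      if 2 ≤ l - counting_vowels c n perm ∧ l - counting_vowels c n perm < l then
        candidate ++ [perm]
      else candidate) []

-- ===== PORT B =====
def goB (l : Int) (rest : List String) (pick : List String) (vcnt : Int) : List (List String) :=
  if (pick.length : Int) = l then
    if 2 ≤ l - vcnt ∧ l - vcnt < l then [pick] else []
  else
    match rest with
    | [] => []
    | head :: tail =>
        goB l tail (pick ++ [head]) (vcnt + if head ∈ ["a", "e", "i", "o", "u"] then 1 else 0)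
          ++ goB l tail pick vcnt

def solution_alt (l : Int) (c : Int) (password : List String) : List (List String) :=
  goB l (PySem.List.sorted password (fun x => x) false) [] 0

-- ===== PRECONDITION & SPEC =====
-- Python's combinations(password, l) raises ValueError for l < 0; Pre_ excludes exactly that.
def Pre_solution (l : Int) (c : Int) (password : List String) : Prop := 0 ≤ l
instance (l : Int) (c : Int) (password : List String) : Decidable (Pre_solution l c password) := by
  unfold Pre_solution; infer_instance

def pvWitness_solution : Int × Int × List String := (3, 0, ["a", "b", "c", "d"])

def Spec_solution (l : Int) (c : Int) (password : List String) (out : List (List String)) : Prop := out = solution_alt l c password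
instance (l : Int) (c : Int) (password : List String) (out : List (List String)) : Decidable (Spec_solution l c password out) := by unfold Spec_solution; infer_instance

-- ===== CLAIM (what is proved, stated in full; the proofs are below) =====
def Claim_equal_solution : Prop := ∀ (l : Int) (c : Int) (password : List String), Dom_solution l c password → Pre_solution l c password → Spec_solution l c password (solution l c password)
-- ===== LEMMAS AND PROOFS =====

-- vowel count of a list, structurally
def cntV : List String → Int
  | [] => 0
  | h :: t => (if h ∈ ["a", "e", "i", "o", "u"] then 1 else 0) + cntV t

def condB (l v : Int) : Bool := decide (2 ≤ l - v ∧ l - v < l)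

lemma foldl_cntV (perm : List String) (a : Int) :
    perm.foldl (fun cnt s => if s ∈ ["a", "e", "i", "o", "u"] then cnt + 1 else cnt) a
      = a + cntV perm := by
  induction perm generalizing a with
  | nil => simp [cntV]
  | cons h t ih => simp only [List.foldl, cntV, ih]; split <;> ring

lemma counting_vowels_eq (c : Int) (perm : List String) :
    counting_vowels c (perm.length : Int) perm = cntV perm := by
  unfold counting_vowels
  rw [PySem.List.foldl_pyRange_zero_pyGetD' perm ""
    (fun cnt s => if s ∈ ["a", "e", "i", "o", "u"] then cnt + 1 else cnt) 0]
  rw [foldl_cntV]; ring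

lemma goB_eq (l : Int) (rest : List String) :
    ∀ (pick : List String) (vcnt : Int) (k : Nat), (pick.length : Int) + (k : Int) = l →
    goB l rest pick vcnt
      = ((pyCombinations k rest).filter (fun ys => condB l (vcnt + cntV ys))).map (pick ++ ·) := by
  induction rest with
  | nil =>
    intro pick vcnt k hk
    cases k with
    | zero =>
      rw [goB]
      simp only [Nat.cast_zero, add_zero] at hk
      rw [if_pos hk]
      by_cases h1 : 2 ≤ l - vcnt <;> by_cases h2 : l - vcnt < l <;>
        simp [pyCombinations, List.filter_cons, List.filter_nil, condB, cntV, h1, h2] <;>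
        first
        | omega
        | (rw [if_pos (by omega)]; simp)
    | succ k =>
      rw [goB]
      have hne : ¬ ((pick.length : Int) = l) := by
        intro h; rw [h] at hk; push_cast at hk; omega
      simp [hne, pyCombinations]
  | cons h t ih =>
    intro pick vcnt k hk
    cases k with
    | zero =>
      rw [goB]
      simp only [Nat.cast_zero, add_zero] at hk
      rw [if_pos hk]
      by_cases h1 : 2 ≤ l - vcnt <;> by_cases h2 : l - vcnt < l <;>
        simp [pyCombinations, List.filter_cons, List.filter_nil, condB, cntV, h1, h2] <;>
        first
        | omega
        | (rw [if_pos (by omega)]; simp)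
    | succ k =>
      rw [goB]
      have hne : ¬ ((pick.length : Int) = l) := by
        intro he; rw [he] at hk; push_cast at hk; omega
      simp only [hne, if_false]
      rw [ih (pick ++ [h]) _ k (by simp only [List.length_append, List.length_cons,
            List.length_nil, Nat.zero_add]; push_cast at hk ⊢; omega),
          ih pick vcnt (k + 1) hk]
      have hfun : ((fun x => pick ++ x) ∘ fun x => h :: x)
          = (fun x => (pick ++ [h]) ++ x) := by funext x; simp
      have hp : ((fun ys => condB l (vcnt + cntV ys)) ∘ fun x => h :: x)
          = (fun ys => condB l ((vcnt + if h ∈ ["a", "e", "i", "o", "u"] then 1 else 0) + cntV ys)) := by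
        funext ys; simp only [Function.comp, cntV]; congr 1; ring
      simp only [pyCombinations, List.filter_append, List.map_append, List.filter_map,
        List.map_map, hfun, hp]

lemma foldl_filter (l c : Int) (perms : List (List String)) (init : List (List String)) :
    perms.foldl
      (fun candidate perm =>
        let n : Int := perm.length
        if 2 ≤ l - counting_vowels c n perm ∧ l - counting_vowels c n perm < l then
          candidate ++ [perm]
        else candidate) init
      = init ++ perms.filter
          (fun perm => condB l (counting_vowels c (perm.length : Int) perm)) := by
  induction perms generalizing init with
  | nil => simp
  | cons p t ih =>
    simp only [List.foldl, List.filter_cons]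
    rw [ih]
    by_cases hp : 2 ≤ l - counting_vowels c (p.length : Int) p ∧
        l - counting_vowels c (p.length : Int) p < l
    · simp only [hp, if_true, condB]
      simp
    · simp only [hp, if_false, condB]
      rw [if_neg (by simp [hp])]

-- ===== VERDICT (by name: the statement is the Claim_ definition above) =====
theorem solution_spec : Claim_equal_solution := by
  intro l c password _ hpre
  unfold Spec_solution solution solution_alt
  dsimp only
  rw [foldl_filter, goB_eq l (PySem.List.sorted password (fun x => x) false) [] 0 l.toNat
    (by simp [Int.toNat_of_nonneg hpre])]
  simp only [List.nil_append, List.map_id']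
  refine List.filter_congr ?_
  intro perm _
  rw [counting_vowels_eq, zero_add]
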